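-- pv_equiv track=rewrite | github.com/lb1224-icl/L-LUT-to-P-LUT-Synthesis | src/decompose/clut.py | _similarity_matrix
-- ===== SOURCE A (Python) =====
-- from typing import List, Tuple
--
-- def _similarity_matrix(subtables: List[List[int]], out_width: int, max_shift: int) -> List[List[int]]:
--     # sm[i][j] = smallest t such that ST_i >> t == ST_j, else -1
--     n = len(subtables)
--     sm = [[-1] * n for _ in range(n)]
--     for i in range(n):
--         for j in range(n):
--             for t in range(max_shift + 1):
--                 if all((subtables[i][k] >> t) == subtables[j][k] for k in range(len(subtables[i]))):
--                     sm[i][j] = t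
--                     break
--     return sm
-- ===== SOURCE B (Python) =====
-- from typing import List
--
-- def _pair_shift(src: List[int], dst: List[int], max_shift: int) -> int:
--     # Smallest t in [0, max_shift] with src[k] >> t == dst[k] for all k, else -1.
--     if max_shift < 0:
--         return -1
--     forced = None   # the single t any nonzero target pins down
--     lb = 0          # lower bound imposed by targets 0 / -1
--     for a, b in zip(src, dst):
--         if (a < 0) != (b < 0):
--             return -1
--         # reduce a >> t == b to the nonnegative pair via  x >> t == y  <=>  ~x >> t == ~y
--         if a < 0:
--             a, b = ~a, ~b
--         if b == 0:
--             lb = max(lb, a.bit_length())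
--         else:
--             t = a.bit_length() - b.bit_length()
--             if t < 0 or (a >> t) != b or (forced is not None and forced != t):
--                 return -1
--             forced = t
--     if forced is None:
--         return lb if lb <= max_shift else -1
--     return forced if lb <= forced <= max_shift else -1
--
-- def _similarity_matrix(subtables: List[List[int]], out_width: int, max_shift: int) -> List[List[int]]:
--     return [[_pair_shift(si, sj, max_shift) for sj in subtables] for si in subtables]
-- ===== Notes on version B (the rewrite author's own statement) =====
-- stated objective: faster
-- what changed: Instead of scanning every candidate shift t in range(max_shift+1) and re-checking the whole pair of rows for each t, B derives the unique admissible shift per element in closed form from bit lengths (reducing negative values via x>>t==y <=> ~x>>t==~y) and intersects these constraints in one pass over zip(src,dst).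
import Mathlib
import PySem

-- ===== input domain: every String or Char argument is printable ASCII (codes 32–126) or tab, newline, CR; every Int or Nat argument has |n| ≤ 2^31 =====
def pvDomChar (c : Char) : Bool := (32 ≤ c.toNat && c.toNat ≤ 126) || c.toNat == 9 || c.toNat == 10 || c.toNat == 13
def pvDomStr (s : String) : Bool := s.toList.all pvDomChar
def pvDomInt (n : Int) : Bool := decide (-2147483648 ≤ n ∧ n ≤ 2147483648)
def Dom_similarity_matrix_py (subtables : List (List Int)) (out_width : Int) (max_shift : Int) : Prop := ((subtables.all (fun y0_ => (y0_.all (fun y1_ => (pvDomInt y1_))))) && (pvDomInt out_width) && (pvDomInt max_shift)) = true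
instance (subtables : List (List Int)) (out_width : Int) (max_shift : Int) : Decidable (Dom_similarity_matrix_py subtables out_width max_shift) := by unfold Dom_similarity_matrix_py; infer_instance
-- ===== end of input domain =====

-- B replaces A's scan over all candidate shifts by a closed-form bit-length computation per pair
-- (objective: faster); equivalence is about the return value (A mutates only its local sm).

-- ===== PORT A =====
-- A's inner all(...) over k in range(len(subtables[i])); its t comes from range(max_shift+1), so t ≥ 0.
-- pyGetD's default is never compared on Pre_: Python's generator raises exactly on the inputs Pre_
-- excludes, and everywhere else it short-circuits before any out-of-range index of subtables[j].
def pyAllK (si sj : List Int) (t : Int) : Bool :=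
  (PySem.List.pyRange 0 (si.length : Int) 1).all (fun k =>
    ((PySem.List.pyGetD si k 0) >>> t.toNat) == PySem.List.pyGetD sj k 0)

-- A's `for t in range(max_shift+1): if all(...): sm[i][j] = t; break` as a counter loop, -1 when
-- no t matches (each sm[i][j] is written at most once, so the initialization plus in-place writes
-- of sm are rendered cell by cell).
def findLoopA (si sj : List Int) (bound : Int) (t : Int) : Int :=
  if h : t < bound then (if pyAllK si sj t then t else findLoopA si sj bound (t + 1)) else -1
termination_by (bound - t).toNat
decreasing_by omega

def findShiftA (si sj : List Int) (max_shift : Int) : Int := findLoopA si sj (max_shift + 1) 0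

def similarity_matrix_py (subtables : List (List Int)) (out_width : Int) (max_shift : Int) : List (List Int) :=
  let n : Int := subtables.length
  (PySem.List.pyRange 0 n 1).map (fun i =>
    (PySem.List.pyRange 0 n 1).map (fun j =>
      findShiftA (PySem.List.pyGetD subtables i []) (PySem.List.pyGetD subtables j []) max_shift))

-- ===== PORT B =====
-- Source B's element loop over zip(src, dst), carrying (forced, lb); `none` = Source B's early `return -1`;
-- Python's `forced is not None and forced != t` is `f.isSome && f != some t`.
def goB : List (Int × Int) → Option Int → Int → Option (Option Int × Int)
  | [], f, lb => some (f, lb)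
  | (a, b) :: rest, f, lb =>
    if (decide (a < 0)) != (decide (b < 0)) then none
    else
      let a' := if a < 0 then Int.not a else a
      let b' := if b < 0 then Int.not b else b
      if b' == 0 then goB rest f (max lb ((PySem.Int.bitLength a' : Int)))
      else
        let t : Int := (PySem.Int.bitLength a' : Int) - (PySem.Int.bitLength b' : Int)
        if t < 0 || (a' >>> t.toNat) != b' || (f.isSome && f != some t) then none
        else goB rest (some t) lb

def pairShiftB (src dst : List Int) (max_shift : Int) : Int :=
  if max_shift < 0 then -1
  else
    match goB (src.zip dst) none 0 with
    | none => -1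
    | some (none, lb) => if lb ≤ max_shift then lb else -1
    | some (some f, lb) => if lb ≤ f ∧ f ≤ max_shift then f else -1

def similarity_matrix_py_alt (subtables : List (List Int)) (out_width : Int) (max_shift : Int) : List (List Int) :=
  subtables.map (fun si => subtables.map (fun sj => pairShiftB si sj max_shift))

-- ===== PRECONDITION & SPEC =====
-- Pre_ excludes exactly the inputs where A raises IndexError: some row si fully prefix-matches a
-- strictly shorter row sj (si[k] >> t == sj[k] for all k < len(sj)) at some shift t in
-- range(max_shift+1), making A's generator read the out-of-range sj[len(sj)].  The candidate
-- shifts are capped at 33 so the condition is cheap to decide: on Dom (entries with |n| ≤ 2^31,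
-- hence bit_length ≤ 32) any prefix match at some t ≤ max_shift gives one at some t < 33
-- (lemma prefix_shrink below), so on Dom this is exactly the IndexError condition.
def Pre_similarity_matrix_py (subtables : List (List Int)) (out_width : Int) (max_shift : Int) : Prop :=
  ∀ si ∈ subtables, ∀ sj ∈ subtables, sj.length < si.length →
    ∀ t < min ((max_shift + 1).toNat) 33, ¬ (∀ k < sj.length, (si.getD k 0) >>> t = sj.getD k 0)
instance (subtables : List (List Int)) (out_width : Int) (max_shift : Int) : Decidable (Pre_similarity_matrix_py subtables out_width max_shift) := by unfold Pre_similarity_matrix_py; infer_instance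

def pvWitness_similarity_matrix_py : List (List Int) × Int × Int := ([[12, -7, 0], [3, -2, 0], [0, -1, 5]], 8, 4)

def Spec_similarity_matrix_py (subtables : List (List Int)) (out_width : Int) (max_shift : Int) (out : List (List Int)) : Prop := out = similarity_matrix_py_alt subtables out_width max_shift
instance (subtables : List (List Int)) (out_width : Int) (max_shift : Int) (out : List (List Int)) : Decidable (Spec_similarity_matrix_py subtables out_width max_shift out) := by unfold Spec_similarity_matrix_py; infer_instance

-- ===== CLAIM (what is proved, stated in full; the proofs are below) =====
def Claim_equal_similarity_matrix_py : Prop := ∀ (subtables : List (List Int)) (out_width : Int) (max_shift : Int), Dom_similarity_matrix_py subtables out_width max_shift → Pre_similarity_matrix_py subtables out_width max_shift → Spec_similarity_matrix_py subtables out_width max_shift (similarity_matrix_py subtables out_width max_shift)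

-- ===== LEMMAS AND PROOFS =====

-- the constraint set of a zip prefix, and the meaning of goB's (forced, lb) state
def Qz (l : List (Int × Int)) (t : Nat) : Prop := ∀ p ∈ l, p.1 >>> t = p.2
def SatB (f : Option Int) (lb : Int) (t : Nat) : Prop := (∀ f0, f = some f0 → (t : Int) = f0) ∧ lb ≤ (t : Int)

lemma not_negSucc (p : Nat) : Int.not (Int.negSucc p) = Int.ofNat p := rfl

-- bit-length brackets (Python-exact bit_length of a nonnegative value)
lemma bl_le_iff (x n : Nat) : PySem.Int.bitLength (x : Int) ≤ n ↔ x < 2 ^ n := by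
  constructor
  · intro h
    have h1 := PySem.Int.lt_two_pow_bitLength (x : Int)
    simp at h1
    exact lt_of_lt_of_le h1 (Nat.pow_le_pow_right (by norm_num) h)
  · intro h
    by_contra hc
    push Not at hc
    have hx0 : (x : Int) ≠ 0 := by
      intro h0
      have : x = 0 := by exact_mod_cast h0
      subst this
      have hz : PySem.Int.bitLength ((0:Nat) : Int) = 0 := by decide
      omega
    have h2 := PySem.Int.two_pow_bitLength_le (x : Int) hx0
    simp at h2
    have : 2 ^ n ≤ 2 ^ (PySem.Int.bitLength (x : Int) - 1) := Nat.pow_le_pow_right (by norm_num) (by omega)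
    omega

-- x >> t == 0 exactly from t = x.bit_length() on
lemma natShift_eq_zero_iff (x t : Nat) : x >>> t = 0 ↔ PySem.Int.bitLength (x : Int) ≤ t := by
  rw [Nat.shiftRight_eq_div_pow, Nat.div_eq_zero_iff, bl_le_iff]
  have : 0 < 2 ^ t := by positivity
  omega

-- a nonzero target pins the shift down to the bit-length difference
lemma natShift_unique (x y t : Nat) (hy : 0 < y) (h : x >>> t = y) :
    PySem.Int.bitLength (y : Int) ≤ PySem.Int.bitLength (x : Int) ∧
    t = PySem.Int.bitLength (x : Int) - PySem.Int.bitLength (y : Int) := by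
  rw [Nat.shiftRight_eq_div_pow] at h
  have hpow : 0 < 2 ^ t := by positivity
  have hle : y * 2 ^ t ≤ x := (Nat.le_div_iff_mul_le hpow).mp (le_of_eq h.symm)
  have hlt : x < (y + 1) * 2 ^ t := (Nat.div_lt_iff_lt_mul hpow).mp (by omega)
  have hylt : y < 2 ^ PySem.Int.bitLength (y:Int) := (bl_le_iff y _).mp le_rfl
  have hxltb : x < 2 ^ PySem.Int.bitLength (x:Int) := (bl_le_iff x _).mp le_rfl
  have hyge : 2 ^ (PySem.Int.bitLength (y:Int) - 1) ≤ y := by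
    have := PySem.Int.two_pow_bitLength_le (y : Int) (by simpa using hy.ne')
    simpa using this
  have hby1 : 1 ≤ PySem.Int.bitLength (y:Int) := by
    by_contra hc
    have hz : PySem.Int.bitLength (y:Int) = 0 := by omega
    rw [hz] at hylt; simp at hylt; omega
  have hxlt : x < 2 ^ (PySem.Int.bitLength (y:Int) + t) := by
    calc x < (y+1) * 2^t := hlt
    _ ≤ 2^(PySem.Int.bitLength (y:Int)) * 2^t := by nlinarith
    _ = 2 ^ (PySem.Int.bitLength (y:Int) + t) := by rw [pow_add]
  have hup : PySem.Int.bitLength (x:Int) ≤ PySem.Int.bitLength (y:Int) + t := (bl_le_iff x _).mpr hxlt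
  have hxge : 2 ^ (PySem.Int.bitLength (y:Int) - 1 + t) ≤ x := by
    calc 2 ^ (PySem.Int.bitLength (y:Int) - 1 + t) = 2 ^ (PySem.Int.bitLength (y:Int)-1) * 2^t := by rw [pow_add]
    _ ≤ y * 2^t := Nat.mul_le_mul_right _ hyge
    _ ≤ x := hle
  have hlow : PySem.Int.bitLength (y:Int) + t ≤ PySem.Int.bitLength (x:Int) := by
    by_contra hc
    push Not at hc
    have h2 : (2:Nat) ^ PySem.Int.bitLength (x:Int) ≤ 2 ^ (PySem.Int.bitLength (y:Int) - 1 + t) :=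
      Nat.pow_le_pow_right (by norm_num) (by omega)
    omega
  omega

-- a shift never changes the sign side (Python >> on negatives never reaches 0)
lemma elem_mismatch (a b : Int) (h : decide (a < 0) ≠ decide (b < 0)) (t : Nat) : a >>> t ≠ b := by
  cases a with
  | ofNat m => cases b with
    | ofNat p => simp at h; omega
    | negSucc p =>
      rw [show (Int.ofNat m) >>> t = Int.ofNat (m >>> t) from rfl]
      intro hc; exact Int.noConfusion hc
  | negSucc m => cases b with
    | ofNat p =>
      rw [show (Int.negSucc m) >>> t = Int.negSucc (m >>> t) from rfl]
      intro hc; exact Int.noConfusion hc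
    | negSucc p => simp at h

-- a >> t == b reduces to the nonnegative pair via  x >> t == y  ⟺  ~x >> t == ~y
lemma elem_same (a b : Int) (h : decide (a < 0) = decide (b < 0)) (t : Nat) :
    (a >>> t = b) ↔ ((if a < 0 then Int.not a else a).toNat) >>> t = ((if b < 0 then Int.not b else b).toNat) := by
  cases a with
  | ofNat m => cases b with
    | ofNat p =>
      have hm : ¬ ((Int.ofNat m) < 0) := by simp
      have hp : ¬ ((Int.ofNat p) < 0) := by simp
      rw [if_neg hm, if_neg hp, show (Int.ofNat m) >>> t = Int.ofNat (m >>> t) from rfl]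
      show Int.ofNat (m >>> t) = Int.ofNat p ↔ m >>> t = p
      exact ⟨fun hh => Int.ofNat.inj hh, fun hh => congrArg Int.ofNat hh⟩
    | negSucc p => simp at h; exact absurd h (by simp)
  | negSucc m => cases b with
    | ofNat p => simp at h; exact absurd h (by simp)
    | negSucc p =>
      have hm : (Int.negSucc m) < 0 := Int.negSucc_lt_zero m
      have hp : (Int.negSucc p) < 0 := Int.negSucc_lt_zero p
      rw [if_pos hm, if_pos hp, show (Int.negSucc m) >>> t = Int.negSucc (m >>> t) from rfl,
          not_negSucc, not_negSucc]
      simp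

lemma prime_nonneg (a : Int) : 0 ≤ (if a < 0 then Int.not a else a) := by
  split_ifs with h
  · cases a with
    | ofNat m => exact absurd h (by simp)
    | negSucc m => rw [not_negSucc]; exact Int.natCast_nonneg m
  · omega

lemma Qz_cons (a b : Int) (l : List (Int × Int)) (t : Nat) :
    Qz ((a,b) :: l) t ↔ (a >>> t = b ∧ Qz l t) := by
  unfold Qz; simp

-- loop invariant of Source B's element loop: the final (forced, lb) state describes exactly the
-- shifts satisfying the constraints seen so far, and `none` means they are unsatisfiable
lemma goB_spec (l : List (Int × Int)) : ∀ (f : Option Int) (lb : Int),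
    0 ≤ lb → (∀ f0, f = some f0 → 0 ≤ f0) →
    (goB l f lb = none → ∀ t : Nat, ¬ (SatB f lb t ∧ Qz l t)) ∧
    (∀ f' lb', goB l f lb = some (f', lb') →
      0 ≤ lb' ∧ (∀ f0, f' = some f0 → 0 ≤ f0) ∧
      ∀ t : Nat, (SatB f lb t ∧ Qz l t) ↔ SatB f' lb' t) := by
  induction l with
  | nil =>
    intro f lb h0 hf
    constructor
    · intro h; simp [goB] at h
    · intro f' lb' h
      simp [goB] at h
      obtain ⟨rfl, rfl⟩ := h
      refine ⟨h0, hf, ?_⟩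
      intro t
      simp [Qz]
  | cons hd rest ih =>
    obtain ⟨a, b⟩ := hd
    intro f lb h0 hf
    by_cases hsign : decide (a < 0) = decide (b < 0)
    case neg =>
      have hg : goB ((a,b) :: rest) f lb = none := by
        simp only [goB]
        rw [if_pos (by simpa using hsign)]
      rw [hg]
      constructor
      · intro _ t hc
        exact elem_mismatch a b hsign t ((Qz_cons a b rest t).mp hc.2).1
      · intro f' lb' h; simp at h
    case pos =>
      have hsign' : ((decide (a < 0)) != (decide (b < 0))) = false := by simp [hsign]
      set A' := if a < 0 then Int.not a else a with hA'
      set B' := if b < 0 then Int.not b else b with hB'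
      have hA'n : 0 ≤ A' := prime_nonneg a
      have hB'n : 0 ≤ B' := prime_nonneg b
      have hAm : A' = ((A'.toNat : Nat) : Int) := (Int.toNat_of_nonneg hA'n).symm
      have hBm : B' = ((B'.toNat : Nat) : Int) := (Int.toNat_of_nonneg hB'n).symm
      have helem : ∀ t : Nat, (a >>> t = b) ↔ A'.toNat >>> t = B'.toNat := fun t => elem_same a b hsign t
      by_cases hz : B' = 0
      case pos =>
        have hg : goB ((a,b) :: rest) f lb = goB rest f (max lb ((PySem.Int.bitLength A' : Int))) := by
          simp only [goB]
          rw [if_neg (by simp [hsign]), if_pos (by simp [← hB', hz])]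
        have hblA : PySem.Int.bitLength A' = PySem.Int.bitLength ((A'.toNat : Nat) : Int) := by rw [← hAm]
        have hp0 : B'.toNat = 0 := by simp [hz]
        have hmax0 : 0 ≤ max lb ((PySem.Int.bitLength A' : Int)) := le_max_of_le_left h0
        obtain ⟨ihn, ihs⟩ := ih f (max lb ((PySem.Int.bitLength A' : Int))) hmax0 hf
        have hsat : ∀ t : Nat, (SatB f lb t ∧ Qz ((a,b)::rest) t) ↔
            (SatB f (max lb ((PySem.Int.bitLength A' : Int))) t ∧ Qz rest t) := by
          intro t
          rw [Qz_cons, helem t, hp0, natShift_eq_zero_iff, ← hblA]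
          unfold SatB
          constructor
          · rintro ⟨⟨hsf, hslb⟩, hbl, hq⟩
            refine ⟨⟨hsf, ?_⟩, hq⟩
            rw [max_le_iff]
            exact ⟨hslb, by exact_mod_cast hbl⟩
          · rintro ⟨⟨hsf, hslb⟩, hq⟩
            exact ⟨⟨hsf, le_trans (le_max_left _ _) hslb⟩,
              ⟨by exact_mod_cast le_trans (le_max_right _ _) hslb, hq⟩⟩
        rw [hg]
        constructor
        · intro hnone t hc
          exact ihn hnone t ((hsat t).mp hc)
        · intro f' lb' hsome
          obtain ⟨i1, i2, i3⟩ := ihs f' lb' hsome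
          exact ⟨i1, i2, fun t => (hsat t).trans (i3 t)⟩
      case neg =>
        have hp_pos : 0 < B'.toNat := by
          rcases lt_or_eq_of_le hB'n with h | h
          · omega
          · exact absurd h.symm hz
        have hblA : PySem.Int.bitLength A' = PySem.Int.bitLength ((A'.toNat : Nat) : Int) := by rw [← hAm]
        have hblB : PySem.Int.bitLength B' = PySem.Int.bitLength ((B'.toNat : Nat) : Int) := by rw [← hBm]
        set t0 : Int := (PySem.Int.bitLength A' : Int) - (PySem.Int.bitLength B' : Int) with ht0
        have hforce : ∀ t : Nat, a >>> t = b → (t : Int) = t0 := by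
          intro t helt
          have hm := (helem t).mp helt
          obtain ⟨hble, hteq⟩ := natShift_unique A'.toNat B'.toNat t hp_pos hm
          rw [← hblA, ← hblB] at hble hteq
          omega
        have hshiftA : ∀ u : Nat, A' >>> u = ((A'.toNat >>> u : Nat) : Int) := by
          intro u; rw [hAm]; rfl
        by_cases hcond : (decide (t0 < 0) || (A' >>> t0.toNat) != B' || (f.isSome && f != some t0)) = true
        case pos =>
          have hg : goB ((a,b) :: rest) f lb = none := by
            simp only [goB]
            rw [if_neg (by simp [hsign]), if_neg (by simp [← hB', hz]), ← hA', ← hB', ← ht0,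
              if_pos hcond]
          rw [hg]
          refine ⟨fun _ t hc => ?_, fun f' lb' h => by simp at h⟩
          obtain ⟨hsat, hqz⟩ := hc
          have helt := ((Qz_cons a b rest t).mp hqz).1
          have htt0 : (t : Int) = t0 := hforce t helt
          have h1 : ¬ (t0 < 0) := by omega
          have h2 : A' >>> t0.toNat = B' := by
            have : t0.toNat = t := by omega
            rw [this, hshiftA, (helem t).mp helt, ← hBm]
          rcases Bool.or_eq_true_iff.mp hcond with hor | h3
          · rcases Bool.or_eq_true_iff.mp hor with ha1 | ha2
            · exact h1 (by simpa using ha1)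
            · exact absurd h2 (by simpa using ha2)
          · cases f with
            | none => simp at h3
            | some f0 =>
              have hne : f0 ≠ t0 := by simpa using h3
              have := hsat.1 f0 rfl
              omega
        case neg =>
          rw [Bool.or_eq_true_iff, Bool.or_eq_true_iff] at hcond
          push Not at hcond
          obtain ⟨⟨h1, h2⟩, h3⟩ := hcond
          have ht0n : ¬ (t0 < 0) := by simpa using h1
          have hver : A' >>> t0.toNat = B' := by simpa using h2
          have hconf : ∀ f0, f = some f0 → f0 = t0 := by
            intro f0 hfe
            subst hfe
            simpa using h3
          have hg : goB ((a,b) :: rest) f lb = goB rest (some t0) lb := by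
            simp only [goB]
            rw [if_neg (by simp [hsign]), if_neg (by simp [← hB', hz]), ← hA', ← hB', ← ht0]
            rw [if_neg (by simp only [Bool.or_eq_true]; push Not; exact ⟨⟨h1, h2⟩, h3⟩)]
          have hvernat : A'.toNat >>> t0.toNat = B'.toNat := by
            have := hver
            rw [hshiftA] at this
            omega
          have hsat : ∀ t : Nat, (SatB f lb t ∧ Qz ((a,b)::rest) t) ↔
              (SatB (some t0) lb t ∧ Qz rest t) := by
            intro t
            rw [Qz_cons]
            constructor
            · rintro ⟨⟨hsf, hslb⟩, helt, hq⟩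
              have htt0 : (t : Int) = t0 := hforce t helt
              exact ⟨⟨fun f0 hh => by injection hh with hh; omega, hslb⟩, hq⟩
            · rintro ⟨⟨hsf, hslb⟩, hq⟩
              have htt0 : (t : Int) = t0 := hsf t0 rfl
              have helt : a >>> t = b := by
                rw [helem t]
                have : t = t0.toNat := by omega
                rw [this]
                exact hvernat
              exact ⟨⟨fun f0 hh => (hconf f0 hh) ▸ htt0, hslb⟩, helt, hq⟩
          obtain ⟨ihn, ihs⟩ := ih (some t0) lb h0 (fun f0 hh => by injection hh with hh; omega)
          rw [hg]
          constructor
          · intro hnone t hc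
            exact ihn hnone t ((hsat t).mp hc)
          · intro f' lb' hsome
            obtain ⟨i1, i2, i3⟩ := ihs f' lb' hsome
            exact ⟨i1, i2, fun t => (hsat t).trans (i3 t)⟩

lemma pyAllK_iff (si sj : List Int) (t : Nat) :
    pyAllK si sj (t : Int) = true ↔ ∀ k < si.length, (si.getD k 0) >>> t = sj.getD k 0 := by
  unfold pyAllK
  rw [PySem.List.pyRange_zero_natCast, List.all_eq_true]
  constructor
  · intro h k hk
    have := h (Int.ofNat k) (List.mem_map.mpr ⟨k, List.mem_range.mpr hk, rfl⟩)
    simpa using this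
  · intro h x hx
    obtain ⟨k, hk, rfl⟩ := List.mem_map.mp hx
    have := h k (List.mem_range.mp hk)
    simpa using this

lemma Qz_zip_iff (si sj : List Int) (t : Nat) :
    Qz (si.zip sj) t ↔ ∀ k < min si.length sj.length, (si.getD k 0) >>> t = sj.getD k 0 := by
  unfold Qz
  constructor
  · intro h k hk
    have h1 : k < si.length := lt_of_lt_of_le hk (min_le_left _ _)
    have h2 : k < sj.length := lt_of_lt_of_le hk (min_le_right _ _)
    have hkz : k < (si.zip sj).length := by rw [List.length_zip]; omega
    have hm : (si[k], sj[k]) ∈ si.zip sj := by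
      rw [show (si[k], sj[k]) = (si.zip sj)[k]'hkz from (List.getElem_zip ..).symm]
      exact List.getElem_mem _
    have := h _ hm
    simpa [List.getD_eq_getElem, h1, h2] using this
  · intro h p hp
    obtain ⟨k, hk, rfl⟩ := List.mem_iff_getElem.mp hp
    rw [List.length_zip] at hk
    have h1 : k < si.length := lt_of_lt_of_le hk (min_le_left _ _)
    have h2 : k < sj.length := lt_of_lt_of_le hk (min_le_right _ _)
    have := h k (by omega)
    simpa [List.getElem_zip, List.getD_eq_getElem, h1, h2] using this

-- A's break-loop finds the least satisfying index
lemma find?_range_least (n : Nat) (p : Nat → Bool) (m : Nat) (hm : m < n) (hp : p m = true)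
    (hmin : ∀ j < m, ¬ p j = true) : (List.range n).find? p = some m := by
  induction n with
  | zero => omega
  | succ n ih =>
    rw [List.range_succ, List.find?_append]
    by_cases h : m < n
    · rw [ih h]; rfl
    · have hmn : m = n := by omega
      subst hmn
      have : (List.range m).find? p = none := by
        rw [List.find?_eq_none]
        intro x hx
        exact hmin x (List.mem_range.mp hx)
      rw [this]
      simp [hp]

lemma pyRange_empty_of_nonpos (b : Int) (h : b ≤ 0) : PySem.List.pyRange 0 b 1 = [] := by
  rw [PySem.List.pyRange_one]
  have : (b - 0).toNat = 0 := by omega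
  rw [this]
  simp

-- the counter loop is the break-search over range(max_shift+1)
lemma findLoopA_eq (si sj : List Int) (b : Int) : ∀ (n : Nat) (t : Int), (b - t).toNat = n →
    findLoopA si sj b t = ((PySem.List.pyRange t b 1).find? (fun x => pyAllK si sj x)).getD (-1) := by
  intro n
  induction n with
  | zero =>
    intro t hn
    unfold findLoopA
    rw [dif_neg (by omega), PySem.List.pyRange_one]
    have h0 : (b - t).toNat = 0 := hn
    rw [h0]
    simp
  | succ n ihn =>
    intro t hn
    have htb : t < b := by omega
    unfold findLoopA
    rw [dif_pos htb, PySem.List.pyRange_one_cons htb, List.find?_cons]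
    cases hp : pyAllK si sj t
    · simp only
      exact ihn (t + 1) (by omega)
    · simp

lemma findShiftA_eq (si sj : List Int) (ms : Int) :
    findShiftA si sj ms = ((PySem.List.pyRange 0 (ms + 1) 1).find? (fun t => pyAllK si sj t)).getD (-1) := by
  unfold findShiftA
  exact findLoopA_eq si sj (ms + 1) _ 0 rfl

-- B returns the least admissible shift, or -1 when there is none
lemma pairB_charac (si sj : List Int) (ms : Int) (hms : ¬ ms < 0) :
    (pairShiftB si sj ms = -1 → ∀ t : Nat, (t : Int) ≤ ms → ¬ Qz (si.zip sj) t) ∧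
    (pairShiftB si sj ms ≠ -1 → ∃ t : Nat, (t : Int) = pairShiftB si sj ms ∧ (t : Int) ≤ ms ∧
      Qz (si.zip sj) t ∧ ∀ j < t, ¬ Qz (si.zip sj) j) := by
  have hgo := goB_spec (si.zip sj) none 0 le_rfl (by simp)
  unfold pairShiftB
  rw [if_neg hms]
  rcases hres : goB (si.zip sj) none 0 with _ | ⟨f', lb'⟩
  · have hn := hgo.1 hres
    refine ⟨fun _ t _ hq => hn t ⟨⟨by simp, by positivity⟩, hq⟩, fun hc => absurd rfl hc⟩
  · obtain ⟨hlb0, hf0, hiff⟩ := hgo.2 f' lb' hres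
    have hQ : ∀ t : Nat, Qz (si.zip sj) t ↔ SatB f' lb' t := by
      intro t
      rw [← hiff t]
      constructor
      · intro h; exact ⟨⟨by simp, by positivity⟩, h⟩
      · exact fun h => h.2
    cases f' with
    | none =>
      simp only
      split_ifs with hle
      · constructor
        · intro hc; omega
        · intro _
          refine ⟨lb'.toNat, by omega, by omega, ?_, ?_⟩
          · rw [hQ]; exact ⟨by simp, by omega⟩
          · intro j hj hq
            rw [hQ] at hq
            have := hq.2
            simp at this ⊢
            omega
      · constructor
        · intro _ t ht hq
          rw [hQ] at hq
          have := hq.2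
          simp at this
          omega
        · intro hc; exact absurd rfl hc
    | some f0 =>
      have hf0n : 0 ≤ f0 := hf0 f0 rfl
      simp only
      split_ifs with hle
      · constructor
        · intro hc; omega
        · intro _
          refine ⟨f0.toNat, by omega, by omega, ?_, ?_⟩
          · rw [hQ]
            exact ⟨fun g hg => by injection hg with hg; omega, by omega⟩
          · intro j hj hq
            rw [hQ] at hq
            have := hq.1 f0 rfl
            omega
      · constructor
        · intro _ t ht hq
          rw [hQ] at hq
          have h1 := hq.1 f0 rfl
          have h2 := hq.2
          omega
        · intro hc; exact absurd rfl hc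

lemma int_not_eq (a : Int) : Int.not a = -a - 1 := by
  cases a with
  | ofNat m =>
    rw [show Int.not (Int.ofNat m) = Int.negSucc m from rfl, Int.negSucc_eq,
      show (Int.ofNat m) = (m:Int) from rfl]
    ring
  | negSucc m =>
    rw [show Int.not (Int.negSucc m) = Int.ofNat m from rfl, Int.negSucc_eq,
      show (Int.ofNat m) = (m:Int) from rfl]
    ring

-- on Dom a prefix match at any admissible t yields one below the 33-cap of Pre_
lemma prefix_shrink (si sj : List Int) (ms : Int) (hlen : sj.length < si.length)
    (hdom : ∀ a ∈ si, pvDomInt a = true) (t : Nat) (ht : (t : Int) ≤ ms)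
    (hm : ∀ k < sj.length, (si.getD k 0) >>> t = sj.getD k 0) :
    ∃ t' < min ((ms + 1).toNat) 33, ∀ k < sj.length, (si.getD k 0) >>> t' = sj.getD k 0 := by
  by_cases hts : t ≤ 32
  · exact ⟨t, by omega, hm⟩
  · refine ⟨32, by omega, ?_⟩
    intro k hk
    have h := hm k hk
    have hki : k < si.length := by omega
    have hamem : si.getD k 0 ∈ si := by
      rw [List.getD_eq_getElem si 0 hki]
      exact List.getElem_mem _
    have hbnd' : -2147483648 ≤ si.getD k 0 ∧ si.getD k 0 ≤ 2147483648 := by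
      have := hdom _ hamem
      unfold pvDomInt at this
      exact of_decide_eq_true this
    have hsign : decide (si.getD k 0 < 0) = decide (sj.getD k 0 < 0) := by
      by_contra hc
      exact elem_mismatch _ _ hc t h
    rw [elem_same _ _ hsign] at h ⊢
    have haN : ((if si.getD k 0 < 0 then Int.not (si.getD k 0) else si.getD k 0).toNat) < 2 ^ 32 := by
      have hnot := int_not_eq (si.getD k 0)
      split_ifs with hneg <;> rw [show (2:Nat)^32 = 4294967296 from by norm_num] <;> omega
    have hble : PySem.Int.bitLength
        ((((if si.getD k 0 < 0 then Int.not (si.getD k 0) else si.getD k 0).toNat : Nat)) : Int) ≤ 32 :=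
      (bl_le_iff _ 32).mpr haN
    by_cases hb0 : ((if sj.getD k 0 < 0 then Int.not (sj.getD k 0) else sj.getD k 0).toNat) = 0
    · rw [hb0] at h ⊢
      exact (natShift_eq_zero_iff _ 32).mpr hble
    · obtain ⟨_, hteq⟩ := natShift_unique _ _ t (by omega) h
      have hup := (natShift_unique _ _ t (by omega) h).1
      omega

-- per-pair equivalence (under Pre_'s no-IndexError condition for this pair)
lemma pair_eq (si sj : List Int) (ms : Int)
    (hdom : ∀ a ∈ si, pvDomInt a = true)
    (hpre : sj.length < si.length →
      ∀ t < min ((ms + 1).toNat) 33, ¬ (∀ k < sj.length, (si.getD k 0) >>> t = sj.getD k 0)) :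
    findShiftA si sj ms = pairShiftB si sj ms := by
  by_cases hms : ms < 0
  · unfold pairShiftB
    rw [findShiftA_eq, if_pos hms, pyRange_empty_of_nonpos (ms+1) (by omega)]
    rfl
  · have hN : ms + 1 = (((ms+1).toNat : Nat) : Int) := by omega
    set N := (ms+1).toNat with hNdef
    have hA : findShiftA si sj ms =
        (((List.range N).find? (fun k => pyAllK si sj (Int.ofNat k))).map Int.ofNat).getD (-1) := by
      rw [findShiftA_eq, hN, PySem.List.pyRange_zero_natCast, List.find?_map]
      rfl
    obtain ⟨hBnone, hBsome⟩ := pairB_charac si sj ms hms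
    by_cases hragged : sj.length < si.length
    · -- ragged pair: Pre_ says no admissible prefix match, so both sides give -1
      have hnoQ : ∀ t : Nat, (t:Int) ≤ ms → ¬ Qz (si.zip sj) t := by
        intro t ht hq
        rw [Qz_zip_iff, min_eq_right hragged.le] at hq
        obtain ⟨t', ht', hm'⟩ := prefix_shrink si sj ms hragged hdom t ht hq
        exact hpre hragged t' ht' hm'
      have hBn : pairShiftB si sj ms = -1 := by
        by_contra hc
        obtain ⟨t, _, ht, hq, _⟩ := hBsome hc
        exact hnoQ t ht hq
      rw [hA, hBn]
      have : (List.range N).find? (fun k => pyAllK si sj (Int.ofNat k)) = none := by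
        rw [List.find?_eq_none]
        intro k hk hp
        have hall := (pyAllK_iff si sj k).mp hp
        have hkle : (k : Int) ≤ ms := by
          have := List.mem_range.mp hk
          omega
        obtain ⟨t', ht', hm'⟩ := prefix_shrink si sj ms hragged hdom k hkle
          (fun j hj => hall j (by omega))
        exact hpre hragged t' ht' hm'
      rw [this]; rfl
    · -- aligned pair: A's per-t predicate coincides with the zip constraint set
      have hPS : ∀ t : Nat, pyAllK si sj (Int.ofNat t) = true ↔ Qz (si.zip sj) t := by
        intro t
        rw [show Int.ofNat t = ((t : Nat) : Int) from rfl, pyAllK_iff, Qz_zip_iff,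
          min_eq_left (by omega)]
      by_cases hBn : pairShiftB si sj ms = -1
      · rw [hA, hBn]
        have : (List.range N).find? (fun k => pyAllK si sj (Int.ofNat k)) = none := by
          rw [List.find?_eq_none]
          intro k hk hp
          exact hBnone hBn k (by have := List.mem_range.mp hk; omega) ((hPS k).mp hp)
        rw [this]; rfl
      · obtain ⟨t, hteq, htle, hq, hmin⟩ := hBsome hBn
        have : (List.range N).find? (fun k => pyAllK si sj (Int.ofNat k)) = some t := by
          apply find?_range_least N _ t (by omega) ((hPS t).mpr hq)
          intro j hj hp
          exact hmin j hj ((hPS j).mp hp)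
        rw [hA, this]
        simp [← hteq]

lemma map_range_getD {α β : Type} (l : List α) (d : α) (f : α → β) :
    (List.range l.length).map (fun k => f (l.getD k d)) = l.map f := by
  apply List.ext_getElem
  · simp
  · intro k h1 h2
    simp at h1 ⊢
    rw [List.getElem?_eq_getElem (by simpa using h1 : k < l.length)]
    rfl

-- ===== VERDICT (by name: the statement is the Claim_ definition above) =====
theorem similarity_matrix_py_spec : Claim_equal_similarity_matrix_py := by
  intro st ow ms hdom hpre
  have hrows : ∀ si ∈ st, ∀ a ∈ si, pvDomInt a = true := by
    unfold Dom_similarity_matrix_py at hdom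
    intro si hsi a ha
    have h1 := (Bool.and_eq_true ..).mp ((Bool.and_eq_true ..).mp hdom).1
    exact List.all_eq_true.mp (List.all_eq_true.mp h1.1 si hsi) a ha
  unfold Spec_similarity_matrix_py similarity_matrix_py similarity_matrix_py_alt
  simp only [PySem.List.pyRange_zero_natCast, List.map_map]
  rw [← map_range_getD st [] (fun si => st.map (fun sj => pairShiftB si sj ms))]
  apply List.map_congr_left
  intro k hk
  have hk' : k < st.length := List.mem_range.mp hk
  have hmem : st.getD k [] ∈ st := by
    rw [List.getD_eq_getElem st [] hk']
    exact List.getElem_mem _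
  simp only [Function.comp]
  rw [← map_range_getD st [] (fun sj => pairShiftB (st.getD k []) sj ms)]
  apply List.map_congr_left
  intro j hj
  have hj' : j < st.length := List.mem_range.mp hj
  have hmem' : st.getD j [] ∈ st := by
    rw [List.getD_eq_getElem st [] hj']
    exact List.getElem_mem _
  simp only [Function.comp_apply, PySem.List.pyGetD_natCast]
  exact pair_eq _ _ ms (hrows _ hmem) (hpre _ hmem _ hmem')
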